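-- pv_equiv track=rewrite | github.com/kenjakendi/Kaggle-Santa-2021 | santa_utl.py | list_nearest_neighbours
-- ===== SOURCE A (Python) =====
-- def calculate_distance(permutation_length: int, first: str, second: str) -> int:
--     if second == '*':
--         return 1
--     last_perm = first[-permutation_length:]
--     if last_perm == '':
--         return permutation_length
--     for distance in range(permutation_length+1):
--         if last_perm[distance:] == second[:permutation_length-distance]:
--             return distance
--
-- def list_nearest_neighbours(permutation_length: int, permutation: str, neighbours_list: list):
--     shortest_distance = permutation_length
--     nearest_neighbours = []
--
--     for neighbour in neighbours_list:
--         distance = calculate_distance(permutation_length, permutation, neighbour)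
--         if distance < shortest_distance:
--             shortest_distance = distance
--             nearest_neighbours.clear()
--             nearest_neighbours.append(neighbour)
--         elif distance == shortest_distance:
--             nearest_neighbours.append(neighbour)
--
--     return nearest_neighbours
-- ===== SOURCE B (Python) =====
-- def _overlap(last: str, nb: str) -> int:
--     # largest k such that nb[:k] == last[-k:], via the KMP failure function of
--     # nb + sentinel + last (sentinel '\x00' occurs in neither string on the ASCII domain)
--     s = nb + '\x00' + last
--     f = [0] * len(s)
--     k = 0
--     for i in range(1, len(s)):
--         while k > 0 and s[i] != s[k]:
--             k = f[k - 1]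
--         if s[i] == s[k]:
--             k += 1
--         f[i] = k
--     return k
--
-- def list_nearest_neighbours(permutation_length: int, permutation: str, neighbours_list: list):
--     L = permutation_length
--     last = permutation[-L:]
--     m = len(last)
--     shortest = L
--     nearest = []
--     for nb in neighbours_list:
--         if nb == '*':
--             d = 1
--         elif m == 0:
--             d = L
--         elif m < L:
--             # permutation shorter than L: the only possible overlap is nb being a suffix of it
--             d = (m - len(nb)) if (len(nb) <= m and last.endswith(nb)) else L
--         else:
--             d = L - _overlap(last, nb)
--         if d < shortest:
--             shortest = d
--             nearest = [nb]
--         elif d == shortest: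
--             nearest.append(nb)
--     return nearest
-- ===== Notes on version B (the rewrite author's own statement) =====
-- stated objective: faster
-- what changed: B computes each neighbour's distance as L minus the maximal suffix/prefix overlap, obtained from the KMP failure function of nb + '\x00' + suffix (with a direct endswith test when the permutation is shorter than L), instead of A's scan over all L+1 shifts with a full string comparison per shift.
import Mathlib
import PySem

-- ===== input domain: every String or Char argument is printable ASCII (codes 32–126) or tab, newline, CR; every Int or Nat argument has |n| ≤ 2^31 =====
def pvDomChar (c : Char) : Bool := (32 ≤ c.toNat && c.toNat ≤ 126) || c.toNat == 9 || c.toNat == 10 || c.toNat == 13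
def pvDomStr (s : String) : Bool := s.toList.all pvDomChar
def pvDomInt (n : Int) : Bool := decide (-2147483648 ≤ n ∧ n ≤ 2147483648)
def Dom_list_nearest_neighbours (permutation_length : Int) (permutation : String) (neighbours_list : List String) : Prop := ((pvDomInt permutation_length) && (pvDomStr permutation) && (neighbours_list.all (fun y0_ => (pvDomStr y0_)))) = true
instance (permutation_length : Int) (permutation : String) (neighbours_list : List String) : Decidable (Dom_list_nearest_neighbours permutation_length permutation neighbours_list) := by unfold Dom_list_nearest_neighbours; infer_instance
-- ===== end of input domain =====

-- B replaces A's per-neighbour scan over all L+1 shifts (a full string comparison each) by the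
-- maximal suffix/prefix overlap read off the KMP failure function of nb + NUL + suffix (objective: faster).


-- ===== PORT A =====
-- calculate_distance; `none` = the loop falls through (Python then raises TypeError on `None < int`)
def pvCalcDist (permutation_length : Int) (first second : String) : Option Int :=
  if second = "*" then some 1
  else
    let last_perm := PySem.Str.slice first (some (-permutation_length)) none
    if last_perm = "" then some permutation_length
    else
      (PySem.List.pyRange 0 (permutation_length + 1) 1).find? (fun distance =>
        decide (PySem.Str.slice last_perm (some distance) none
          = PySem.Str.slice second none (some (permutation_length - distance))))

def list_nearest_neighbours (permutation_length : Int) (permutation : String) (neighbours_list : List String) : List String :=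
  let r := neighbours_list.foldl (fun st nb =>
      match st with
      | none => none      -- a previous neighbour made Python raise
      | some (sh, acc) =>
        match pvCalcDist permutation_length permutation nb with
        | none => none
        | some d =>
          if d < sh then some (d, [nb])
          else if d = sh then some (sh, acc ++ [nb])
          else some (sh, acc))
    (some (permutation_length, ([] : List String)))
  match r with
  | some (_, acc) => acc
  | none => []

-- ===== PORT B =====
def pvNul : Char := Char.ofNat 0

-- the `while k > 0 and s[i] != s[k]` loop of Source B's _overlap; fuel = k (k strictly decreases)
def pvKmpInner (s : List Char) (f : List Nat) (c : Char) : Nat → Nat → Nat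
  | 0, k => k
  | fuel + 1, k =>
    if 0 < k ∧ c ≠ s.getD k pvNul then pvKmpInner s f c fuel (f.getD (k - 1) 0) else k

-- one iteration of `for i in range(1, len(s))` in _overlap; state = (k, f so far)
def pvKmpStep (s : List Char) (st : Nat × List Nat) (c : Char) : Nat × List Nat :=
  let k1 := pvKmpInner s st.2 c st.1 st.1
  let k2 := if c = s.getD k1 pvNul then k1 + 1 else k1
  (k2, st.2 ++ [k2])

-- _overlap(last, nb): KMP failure function of s = nb + '\x00' + last, returns final k
def pvOverlap (nb last : List Char) : Nat :=
  let s := nb ++ pvNul :: last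
  ((s.drop 1).foldl (pvKmpStep s) (0, [0])).1

def list_nearest_neighbours_alt (permutation_length : Int) (permutation : String) (neighbours_list : List String) : List String :=
  let last := PySem.Str.slice permutation (some (-permutation_length)) none
  let m : Int := PySem.Str.len last
  (neighbours_list.foldl (fun (st : Int × List String) nb =>
      let d : Int :=
        if nb = "*" then 1
        else if m = 0 then permutation_length
        else if m < permutation_length then
          (if PySem.Str.len nb ≤ m ∧ PySem.Str.endswith last nb = true
           then m - PySem.Str.len nb else permutation_length)
        else permutation_length - (pvOverlap nb.toList last.toList : Int)
      if d < st.1 then (d, [nb])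
      else if d = st.1 then (st.1, st.2 ++ [nb])
      else st)
    (permutation_length, ([] : List String))).2

-- ===== PRECONDITION & SPEC =====
-- Pre_ excludes exactly the inputs on which A raises TypeError: calculate_distance's loop falls
-- through (returns None) iff permutation_length ≤ 0, the slice first[-L:] is non-empty and the
-- neighbour is not '*'; then `None < int` raises.  A is total on Pre_.
def Pre_list_nearest_neighbours (permutation_length : Int) (permutation : String) (neighbours_list : List String) : Prop :=
  1 ≤ permutation_length ∨ PySem.Str.len permutation ≤ -permutation_length ∨
    ∀ nb ∈ neighbours_list, nb = "*"
instance (permutation_length : Int) (permutation : String) (neighbours_list : List String) : Decidable (Pre_list_nearest_neighbours permutation_length permutation neighbours_list) := by unfold Pre_list_nearest_neighbours; infer_instance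

def pvWitness_list_nearest_neighbours : Int × String × List String := (3, "cab", ["abc", "bca", "ca", "*"])

def Spec_list_nearest_neighbours (permutation_length : Int) (permutation : String) (neighbours_list : List String) (out : List String) : Prop := out = list_nearest_neighbours_alt permutation_length permutation neighbours_list
instance (permutation_length : Int) (permutation : String) (neighbours_list : List String) (out : List String) : Decidable (Spec_list_nearest_neighbours permutation_length permutation neighbours_list out) := by unfold Spec_list_nearest_neighbours; infer_instance

-- ===== CLAIM (what is proved, stated in full; the proofs are below) =====
def Claim_equal_list_nearest_neighbours : Prop := ∀ (permutation_length : Int) (permutation : String) (neighbours_list : List String), Dom_list_nearest_neighbours permutation_length permutation neighbours_list → Pre_list_nearest_neighbours permutation_length permutation neighbours_list → Spec_list_nearest_neighbours permutation_length permutation neighbours_list (list_nearest_neighbours permutation_length permutation neighbours_list)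

-- ===== LEMMAS AND PROOFS =====

def pvDistB (permutation_length : Int) (last nb : String) : Int :=
  let m : Int := PySem.Str.len last
  if nb = "*" then 1
  else if m = 0 then permutation_length
  else if m < permutation_length then
    (if PySem.Str.len nb ≤ m ∧ PySem.Str.endswith last nb = true
     then m - PySem.Str.len nb else permutation_length)
  else permutation_length - (pvOverlap nb.toList last.toList : Int)

def pvMxB (t : List Char) : Nat :=
  Nat.findGreatest (fun k => t.take k = t.drop (t.length - k)) (t.length - 1)

lemma pv_brd_restrict {t : List Char} {k j : Nat} (hk : k ≤ t.length)
    (h : t.take k = t.drop (t.length - k)) (hj : j ≤ k) :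
    ((t.take k).take j = (t.take k).drop ((t.take k).length - j)) ↔
      (t.take j = t.drop (t.length - j)) := by
  have h1 : (t.take k).take j = t.take j := by rw [List.take_take]; congr 1; omega
  have h2 : (t.take k).drop ((t.take k).length - j) = t.drop (t.length - j) := by
    rw [List.length_take_of_le hk, h, List.drop_drop]; congr 1; omega
  rw [h1, h2]

lemma pvKmpInner_spec (s : List Char) (f : List Nat) (i : Nat) (hi : i < s.length) (hi1 : 1 ≤ i)
    (hf : ∀ j, j < i → f.getD j 0 = pvMxB (s.take (j + 1))) (c : Char) :
    ∀ fuel k, k ≤ fuel → k < i → s.take k = (s.take i).drop (i - k) →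
    (∀ b, b < i → s.take b = (s.take i).drop (i - b) → s.getD b pvNul = c → b ≤ k) →
    (pvKmpInner s f c fuel k < i ∧
     s.take (pvKmpInner s f c fuel k) = (s.take i).drop (i - pvKmpInner s f c fuel k) ∧
     (∀ b, b < i → s.take b = (s.take i).drop (i - b) → s.getD b pvNul = c →
        b ≤ pvKmpInner s f c fuel k) ∧
     (pvKmpInner s f c fuel k = 0 ∨ s.getD (pvKmpInner s f c fuel k) pvNul = c)) := by
  have hti : (s.take i).length = i := List.length_take_of_le (le_of_lt hi)
  have hstt : ∀ j, j ≤ i → (s.take i).take j = s.take j := by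
    intro j hj; rw [List.take_take]; congr 1; omega
  intro fuel
  induction fuel with
  | zero =>
    intro k hk0 hki hbrd hmax
    interval_cases k
    exact ⟨hi1, hbrd, hmax, Or.inl rfl⟩
  | succ fuel ih =>
    intro k hk hki hbrd hmax
    by_cases hcond : 0 < k ∧ c ≠ s.getD k pvNul
    · rw [pvKmpInner, if_pos hcond]
      have hk1 : k - 1 < i := by omega
      have hfk : f.getD (k - 1) 0 = pvMxB (s.take k) := by
        have := hf (k - 1) hk1
        rwa [Nat.sub_add_cancel hcond.1] at this
      have hklen : k ≤ s.length := by omega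
      have htkl : (s.take k).length = k := List.length_take_of_le hklen
      have hk'le : f.getD (k - 1) 0 ≤ k - 1 := by
        rw [hfk]; unfold pvMxB; rw [htkl]; exact Nat.findGreatest_le _
      have hbrd' : (s.take i).take k = (s.take i).drop ((s.take i).length - k) := by
        rw [hstt k (le_of_lt hki), hti]; exact hbrd
      have hiff : ∀ j, j ≤ k →
          (((s.take k).take j = (s.take k).drop ((s.take k).length - j)) ↔
            ((s.take i).take j = (s.take i).drop ((s.take i).length - j))) := by
        intro j hj
        have := pv_brd_restrict (t := s.take i) (k := k) (j := j)
          (by rw [hti]; exact le_of_lt hki) hbrd' hj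
        rwa [hstt k (le_of_lt hki)] at this
      have hPk' : (s.take k).take (f.getD (k - 1) 0) = (s.take k).drop ((s.take k).length - (f.getD (k - 1) 0)) := by
        have hP0 : (s.take k).take 0 = (s.take k).drop ((s.take k).length - 0) := by simp
        rw [hfk]; unfold pvMxB
        exact Nat.findGreatest_spec
          (P := fun j => (s.take k).take j = (s.take k).drop ((s.take k).length - j))
          (Nat.zero_le _) hP0
      have hbrd'' : s.take (f.getD (k - 1) 0) = (s.take i).drop (i - (f.getD (k - 1) 0)) := by
        have := (hiff (f.getD (k - 1) 0) (by omega)).mp hPk'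
        rwa [hstt _ (by omega), hti] at this
      have hmax' : ∀ b, b < i → s.take b = (s.take i).drop (i - b) → s.getD b pvNul = c →
          b ≤ f.getD (k - 1) 0 := by
        intro b hb hbrdb hcb
        have hbk : b ≤ k := hmax b hb hbrdb hcb
        have hbk' : b < k := by
          rcases Nat.lt_or_ge b k with h | h
          · exact h
          · exfalso
            have hbe : b = k := by omega
            subst hbe
            exact hcond.2 hcb.symm
        have hPb : (s.take k).take b = (s.take k).drop ((s.take k).length - b) := by
          apply (hiff b (le_of_lt hbk')).mpr
          rw [hstt b (by omega), hti]; exact hbrdb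
        rw [hfk]; unfold pvMxB
        exact Nat.le_findGreatest (by omega) hPb
      exact ih (f.getD (k - 1) 0) (by omega) (by omega) hbrd'' hmax'
    · rw [pvKmpInner, if_neg hcond]
      push_neg at hcond
      refine ⟨hki, hbrd, hmax, ?_⟩
      rcases Nat.eq_zero_or_pos k with h0 | h0
      · exact Or.inl h0
      · exact Or.inr (hcond h0).symm


lemma pvKmpStep_spec (s : List Char) (i : Nat) (hi : i < s.length) (hi1 : 1 ≤ i) (f : List Nat)
    (hf : ∀ j, j < i → f.getD j 0 = pvMxB (s.take (j + 1))) :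
    pvKmpStep s (pvMxB (s.take i), f) (s.getD i pvNul) =
      (pvMxB (s.take (i + 1)), f ++ [pvMxB (s.take (i + 1))]) := by
  have hti : (s.take i).length = i := List.length_take_of_le (le_of_lt hi)
  have hstt : ∀ j, j ≤ i → (s.take i).take j = s.take j := by
    intro j hj; rw [List.take_take]; congr 1; omega
  set c := s.getD i pvNul with hc
  set k0 := pvMxB (s.take i) with hk0
  have hk0le : k0 ≤ i - 1 := by
    rw [hk0]; unfold pvMxB
    have h := Nat.findGreatest_le
      (P := fun j => (s.take i).take j = (s.take i).drop ((s.take i).length - j))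
      ((s.take i).length - 1)
    omega
  have hk0i : k0 < i := by omega
  have hP0 : (s.take i).take 0 = (s.take i).drop ((s.take i).length - 0) := by simp
  have hPk0 : (s.take i).take k0 = (s.take i).drop ((s.take i).length - k0) := by
    rw [hk0]; unfold pvMxB
    exact Nat.findGreatest_spec
      (P := fun j => (s.take i).take j = (s.take i).drop ((s.take i).length - j))
      (Nat.zero_le _) hP0
  have hbrd0 : s.take k0 = (s.take i).drop (i - k0) := by
    have h := hPk0
    rwa [hstt _ (by omega), hti] at h
  have hmax0 : ∀ b, b < i → s.take b = (s.take i).drop (i - b) → s.getD b pvNul = c →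
      b ≤ k0 := by
    intro b hb hbrdb _
    have hPb : (s.take i).take b = (s.take i).drop ((s.take i).length - b) := by
      rw [hstt b (le_of_lt hb), hti]; exact hbrdb
    rw [hk0]; unfold pvMxB
    exact Nat.le_findGreatest (by rw [hti]; omega) hPb
  obtain ⟨hk1i, hbrd1, hmax1, hdisj⟩ :=
    pvKmpInner_spec s f i hi hi1 hf c k0 k0 le_rfl hk0i hbrd0 hmax0
  set k1 := pvKmpInner s f c k0 k0 with hk1
  have hlen' : (s.take (i + 1)).length = i + 1 := List.length_take_of_le (by omega)
  have htake' : s.take (i + 1) = s.take i ++ [c] := by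
    rw [List.take_add_one, hc, List.getD_eq_getElem?_getD, List.getElem?_eq_getElem hi]
    rfl
  have hgoal : (if c = s.getD k1 pvNul then k1 + 1 else k1) = pvMxB (s.take (i + 1)) := by
    symm
    unfold pvMxB
    rw [Nat.findGreatest_eq_iff]
    simp only [hlen', Nat.add_sub_cancel]
    refine ⟨?_, ?_, ?_⟩
    · split_ifs <;> omega
    · have hstt' : ∀ j, j ≤ i + 1 → (s.take (i + 1)).take j = s.take j := by
        intro j hj; rw [List.take_take]; congr 1; omega
      have hck : ∀ j (hj : j < s.length), s.getD j pvNul = s[j]'hj := by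
        intro j hj
        rw [List.getD_eq_getElem?_getD, List.getElem?_eq_getElem hj]; rfl
      split_ifs with hcc
      · intro _
        rw [show i + 1 - (k1 + 1) = i - k1 by omega, hstt' _ (by omega), htake',
            List.drop_append_of_le_length (by rw [hti]; omega), ← hbrd1,
            List.take_add_one, List.getElem?_eq_getElem (by omega : k1 < s.length)]
        rw [hck k1 (by omega)] at hcc
        simp [← hcc]
      · intro hne
        exfalso
        rcases hdisj with h0 | h0
        · exact hne h0
        · exact hcc h0.symm
    · intro b' hb'1 hb'2 hPb'
      have hstt' : ∀ j, j ≤ i + 1 → (s.take (i + 1)).take j = s.take j := by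
        intro j hj; rw [List.take_take]; congr 1; omega
      obtain ⟨b, rfl⟩ : ∃ b, b' = b + 1 := ⟨b' - 1, by omega⟩
      rw [show i + 1 - (b + 1) = i - b by omega, hstt' _ (by omega), htake',
          List.drop_append_of_le_length (by rw [hti]; omega),
          List.take_add_one, List.getElem?_eq_getElem (by omega : b < s.length)] at hPb'
      simp only [Option.toList_some] at hPb'
      have hlen1 : (s.take b).length = ((s.take i).drop (i - b)).length := by
        rw [List.length_take_of_le (by omega), List.length_drop, hti]; omega
      obtain ⟨h1, h2⟩ := List.append_inj hPb' hlen1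
      have h3 : s.getD b pvNul = c := by
        rw [List.getD_eq_getElem?_getD, List.getElem?_eq_getElem (by omega : b < s.length)]
        exact List.singleton_inj.mp h2
      have hble : b ≤ k1 := hmax1 b (by omega) h1 h3
      by_cases hcc : c = s.getD k1 pvNul
      · rw [if_pos hcc] at hb'1; omega
      · rw [if_neg hcc] at hb'1
        rcases hdisj with h0 | h0
        · rw [h0] at hble
          have hb0 : b = 0 := by omega
          rw [hb0] at h3
          rw [h0] at hcc
          exact hcc h3.symm
        · exact hcc h0.symm
  rw [pvKmpStep]
  simp only [← hk1]
  rw [hgoal]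

lemma pvMxB_take_one (s : List Char) (hs : 1 ≤ s.length) : pvMxB (s.take 1) = 0 := by
  unfold pvMxB
  rw [List.length_take_of_le hs]
  rfl

lemma pvKmpFold_inv (s : List Char) : ∀ n, n + 1 ≤ s.length →
    ((s.drop 1).take n).foldl (pvKmpStep s) (0, [0]) =
      (pvMxB (s.take (n + 1)), (List.range (n + 1)).map (fun j => pvMxB (s.take (j + 1)))) := by
  intro n
  induction n with
  | zero =>
    intro h1
    simp [pvMxB_take_one s h1]
  | succ n ih =>
    intro h2
    have h1 : n + 1 ≤ s.length := by omega
    have hdl : n < (s.drop 1).length := by rw [List.length_drop]; omega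
    rw [List.take_add_one, List.getElem?_eq_getElem hdl]
    simp only [Option.toList_some]
    rw [List.foldl_append, ih h1]
    have hchar : (s.drop 1)[n] = s.getD (n + 1) pvNul := by
      rw [List.getElem_drop, List.getD_eq_getElem?_getD,
        List.getElem?_eq_getElem (by omega : n + 1 < s.length)]
      simp only [Option.getD_some]
      congr 1
      omega
    have hf : ∀ j, j < n + 1 →
        ((List.range (n + 1)).map (fun j => pvMxB (s.take (j + 1)))).getD j 0 =
          pvMxB (s.take (j + 1)) := by
      intro j hj
      rw [List.getD_eq_getElem?_getD, List.getElem?_map, List.getElem?_range hj]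
      rfl
    simp only [List.foldl_cons, List.foldl_nil, hchar]
    rw [pvKmpStep_spec s (n + 1) (by omega) (by omega) _ hf]
    rw [show n + 1 + 1 = (n + 1) + 1 from rfl, List.range_succ (n := n + 1), List.map_append]
    simp

lemma pvOverlap_eq_mxB (nb last : List Char) :
    pvOverlap nb last = pvMxB (nb ++ pvNul :: last) := by
  show (((nb ++ pvNul :: last).drop 1).foldl (pvKmpStep (nb ++ pvNul :: last)) (0, [0])).1 =
    pvMxB (nb ++ pvNul :: last)
  have hlen : (nb ++ pvNul :: last).length = nb.length + 1 + last.length := by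
    simp; omega
  have h1 : 1 ≤ (nb ++ pvNul :: last).length := by omega
  have := pvKmpFold_inv (nb ++ pvNul :: last) ((nb ++ pvNul :: last).length - 1) (by omega)
  have htk : ((nb ++ pvNul :: last).drop 1).take ((nb ++ pvNul :: last).length - 1) =
      (nb ++ pvNul :: last).drop 1 := by
    apply List.take_of_length_le
    rw [List.length_drop]
  rw [htk] at this
  rw [this]
  simp only []
  congr 1
  rw [Nat.sub_add_cancel h1, List.take_length]

lemma pv_s_nul (nb last : List Char) :
    (nb ++ pvNul :: last)[nb.length]'(by simp) = pvNul := by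
  rw [List.getElem_append_right (le_refl nb.length)]
  simp

lemma pv_s_ne_nul (nb last : List Char) (hnb : pvNul ∉ nb) (hlast : pvNul ∉ last)
    (p : Nat) (hp : p < (nb ++ pvNul :: last).length) (hne : p ≠ nb.length) :
    (nb ++ pvNul :: last)[p] ≠ pvNul := by
  rcases Nat.lt_or_ge p nb.length with h | h
  · rw [List.getElem_append_left h]
    exact fun he => hnb (he ▸ List.getElem_mem h)
  · have h1 : nb.length < p := by omega
    rw [List.getElem_append_right h]
    have h2 : 0 < p - nb.length := by omega
    have h3 : p - nb.length < (pvNul :: last).length := by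
      simp at hp ⊢; omega
    rw [List.getElem_cons]
    split_ifs with h4
    · omega
    · intro he
      exact hlast (he ▸ List.getElem_mem (by simp at h3; omega))

lemma pv_sentinel_brd_iff (nb last : List Char) (hnb : pvNul ∉ nb) (hlast : pvNul ∉ last)
    (k : Nat) (hk : k ≤ nb.length + last.length) :
    ((nb ++ pvNul :: last).take k =
       (nb ++ pvNul :: last).drop ((nb ++ pvNul :: last).length - k)) ↔
      (k ≤ min nb.length last.length ∧ nb.take k = last.drop (last.length - k)) := by
  set s := nb ++ pvNul :: last with hs
  have hlen : s.length = nb.length + 1 + last.length := by rw [hs]; simp; omega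
  have hklen : k ≤ s.length := by omega
  constructor
  · intro h
    -- pointwise consequence
    have hpt : ∀ j (hj : j < k), s[j]'(by omega) = s[s.length - k + j]'(by omega) := by
      intro j hj
      have h1 : (s.take k)[j]'(by rw [List.length_take_of_le hklen]; omega) =
          (s.drop (s.length - k))[j]'(by rw [List.length_drop]; omega) := by
        congr 1
      rw [List.getElem_take, List.getElem_drop] at h1
      exact h1
    -- k ≤ last.length
    have hkm : k ≤ last.length := by
      by_contra hgt
      push_neg at hgt
      rcases Nat.lt_or_ge nb.length k with hn | hn
      · -- nb.length < k: position j = nb.length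
        have hj : nb.length < k := hn
        have := hpt nb.length hj
        rw [pv_s_nul nb last] at this
        have hne : s.length - k + nb.length ≠ nb.length := by omega
        exact pv_s_ne_nul nb last hnb hlast _ (by rw [← hs]; omega) hne this.symm
      · -- k ≤ nb.length, k > last.length: j = k - last.length - 1 maps to sentinel
        have hj : k - last.length - 1 < k := by omega
        have := hpt (k - last.length - 1) hj
        have hidx : s.length - k + (k - last.length - 1) = nb.length := by omega
        simp only [hidx] at this
        rw [pv_s_nul nb last] at this
        have hne : k - last.length - 1 ≠ nb.length := by omega
        exact pv_s_ne_nul nb last hnb hlast _ (by rw [← hs]; omega) hne this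
    have hkn : k ≤ nb.length := by
      by_contra hgt
      push_neg at hgt
      have := hpt nb.length hgt
      rw [pv_s_nul nb last] at this
      have hne : s.length - k + nb.length ≠ nb.length := by omega
      exact pv_s_ne_nul nb last hnb hlast _ (by rw [← hs]; omega) hne this.symm
    refine ⟨by omega, ?_⟩
    have h1 : s.take k = nb.take k := by
      rw [hs]; exact List.take_append_of_le_length hkn
    have h2 : s.drop (s.length - k) = last.drop (last.length - k) := by
      rw [hs, List.drop_append]
      have hL : (nb ++ pvNul :: last).length = nb.length + 1 + last.length := by
        simp; omega
      rw [hL, show nb.length + 1 + last.length - k - nb.length = 1 + (last.length - k) by omega]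
      rw [List.drop_eq_nil_of_le (by omega), List.nil_append]
      rw [← List.drop_drop, List.drop_one]
      rfl
    rw [h1, h2] at h
    exact h
  · intro ⟨hmin, hmatch⟩
    have h1 : s.take k = nb.take k := by
      rw [hs]; exact List.take_append_of_le_length (by omega)
    have h2 : s.drop (s.length - k) = last.drop (last.length - k) := by
      rw [hs, List.drop_append]
      have hL : (nb ++ pvNul :: last).length = nb.length + 1 + last.length := by
        simp; omega
      rw [hL, show nb.length + 1 + last.length - k - nb.length = 1 + (last.length - k) by omega]
      rw [List.drop_eq_nil_of_le (by omega), List.nil_append]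
      rw [← List.drop_drop, List.drop_one]
      rfl
    rw [h1, h2, hmatch]

lemma pvOverlap_spec (nb last : List Char) (hnb : pvNul ∉ nb) (hlast : pvNul ∉ last) :
    (pvOverlap nb last ≤ min nb.length last.length ∧
      nb.take (pvOverlap nb last) = last.drop (last.length - pvOverlap nb last)) ∧
    (∀ k, k ≤ min nb.length last.length → nb.take k = last.drop (last.length - k) →
      k ≤ pvOverlap nb last) := by
  rw [pvOverlap_eq_mxB]
  set s := nb ++ pvNul :: last with hs
  have hlen : s.length = nb.length + 1 + last.length := by rw [hs]; simp; omega
  have hbound : s.length - 1 = nb.length + last.length := by omega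
  constructor
  · rcases Nat.eq_zero_or_pos (pvMxB s) with h0 | h0
    · rw [h0]; simp
    · have hle : pvMxB s ≤ nb.length + last.length := by
        unfold pvMxB
        rw [hbound]
        exact Nat.findGreatest_le _
      have hP : s.take (pvMxB s) = s.drop (s.length - pvMxB s) := by
        unfold pvMxB
        have hP0 : s.take 0 = s.drop (s.length - 0) := by simp
        exact Nat.findGreatest_spec
          (P := fun j => s.take j = s.drop (s.length - j)) (Nat.zero_le _) hP0
      exact (pv_sentinel_brd_iff nb last hnb hlast _ hle).mp hP
  · intro k hk hmatch
    have hP : s.take k = s.drop (s.length - k) :=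
      (pv_sentinel_brd_iff nb last hnb hlast k (by omega)).mpr ⟨hk, hmatch⟩
    unfold pvMxB
    exact Nat.le_findGreatest (by rw [hbound]; omega) hP

lemma pv_find?_range {q : Nat → Bool} {n d : Nat} (hdn : d ≤ n) (hd : q d = true)
    (hlt : ∀ e, e < d → q e = false) : (List.range (n + 1)).find? q = some d := by
  have hsplit : n + 1 = d + (n + 1 - d) := by omega
  rw [hsplit, List.range_add, List.find?_append]
  have h1 : (List.range d).find? q = none := by
    rw [List.find?_eq_none]
    intro x hx
    simp only [List.mem_range] at hx
    simp [hlt x hx]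
  rw [h1]
  have h2 : n + 1 - d = (n - d) + 1 := by omega
  rw [h2, List.range_succ_eq_map]
  simp [hd]

lemma pv_str_empty_iff (s : String) : (s = "") ↔ s.toList = [] := by
  rw [String.ext_iff]; rfl

-- the slice predicate of A's loop, on lists, for 0 ≤ k ≤ LN
lemma pv_q_iff (last nb : String) (LN k : Nat) (hk : k ≤ LN) :
    (decide (PySem.Str.slice last (some ((k : Nat) : Int)) none
      = PySem.Str.slice nb none (some (((LN : Nat) : Int) - ((k : Nat) : Int)))) = true) ↔
    (last.toList.drop k = nb.toList.take (LN - k)) := by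
  have hcast : ((LN : Int) - (k : Int)) = ((LN - k : Nat) : Int) := by omega
  rw [decide_eq_true_iff, String.ext_iff, PySem.Str.toList_slice, PySem.Str.toList_slice,
    PySem.Chars.slice_eq_listSlice, PySem.Chars.slice_eq_listSlice, hcast,
    PySem.List.slice_from_natCast, PySem.List.slice_to_natCast]

lemma pv_dom_no_nul (s : String) (h : pvDomStr s = true) : pvNul ∉ s.toList := by
  intro hmem
  have := List.all_eq_true.mp h _ hmem
  exact absurd this (by decide)

lemma pvDist_eq (L : Int) (perm nb : String)
    (hpD : pvDomStr perm = true) (hnD : pvDomStr nb = true)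
    (h : nb = "*" ∨ 1 ≤ L ∨ PySem.Str.len perm ≤ -L) :
    pvCalcDist L perm nb =
      some (pvDistB L (PySem.Str.slice perm (some (-L)) none) nb) := by
  by_cases hstar : nb = "*"
  · subst hstar
    simp [pvCalcDist, pvDistB]
  set last := PySem.Str.slice perm (some (-L)) none with hlast
  have hA : pvCalcDist L perm nb =
      (if last = "" then some L
       else (PySem.List.pyRange 0 (L + 1) 1).find? (fun distance =>
        decide (PySem.Str.slice last (some distance) none
          = PySem.Str.slice nb none (some (L - distance))))) := by
    rw [pvCalcDist, if_neg hstar]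
  by_cases hemp : last = ""
  · rw [hA, if_pos hemp, pvDistB]
    rw [if_neg hstar]
    have hm0 : PySem.Str.len last = 0 := by
      rw [hemp]; rfl
    rw [hm0]
    simp
  -- main case: last non-empty, hence 1 ≤ L
  have hL : 1 ≤ L := by
    rcases h with h | h | h
    · exact absurd h hstar
    · exact h
    · exfalso
      apply hemp
      rw [pv_str_empty_iff, hlast, PySem.Str.toList_slice, PySem.Chars.slice_eq_listSlice]
      have hL0 : 0 ≤ -L := by
        have := PySem.Str.len_eq perm
        have h0 : (0:Int) ≤ PySem.Str.len perm := by rw [this]; positivity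
        omega
      rw [PySem.List.slice_from perm.toList hL0]
      apply List.drop_eq_nil_of_le
      have := PySem.Str.len_eq perm
      omega
  set LN := L.toNat with hLN
  have hLcast : L = (LN : Int) := by omega
  have hLN1 : 1 ≤ LN := by omega
  have ht : last.toList = perm.toList.drop (perm.toList.length - LN) := by
    rw [hlast, PySem.Str.toList_slice, PySem.Chars.slice_eq_listSlice, hLcast]
    exact PySem.List.slice_from_neg_natCast _ LN (by omega)
  have hmN : last.toList.length = perm.toList.length - (perm.toList.length - LN) := by
    rw [ht, List.length_drop]
  set mN := last.toList.length with hmdef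
  set n2 := nb.toList.length with hn2def
  have hm_le : mN ≤ LN := by omega
  have hm_pos : 0 < mN := by
    rcases Nat.eq_zero_or_pos mN with h0 | h0
    · exact absurd (pv_str_empty_iff last |>.mpr (List.length_eq_zero_iff.mp h0)) hemp
    · exact h0
  have hnulnb : pvNul ∉ nb.toList := pv_dom_no_nul nb hnD
  have hnullast : pvNul ∉ last.toList := by
    rw [ht]; intro hmem; exact pv_dom_no_nul perm hpD (List.mem_of_mem_drop hmem)
  -- A's range rewritten over Nat
  rw [hA, if_neg hemp, hLcast, PySem.List.pyRange_one, List.find?_map]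
  have hnn : ((LN : Int) + 1 - 0).toNat = LN + 1 := by omega
  rw [hnn]
  -- B's value
  rw [pvDistB, if_neg hstar]
  simp only [PySem.Str.len_eq, ← hmdef, ← hn2def]
  rw [if_neg (show ¬((mN : Int) = 0) by exact_mod_cast Nat.pos_iff_ne_zero.mp hm_pos)]
  by_cases hmL : mN = LN
  · -- m = L: the KMP-overlap branch
    obtain ⟨⟨hk0le, hk0match⟩, hk0max⟩ := pvOverlap_spec nb.toList last.toList hnulnb hnullast
    set k0 := pvOverlap nb.toList last.toList with hk0def
    have hk0LN : k0 ≤ LN := by omega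
    rw [if_neg (show ¬((mN : Int) < (LN : Int)) by exact_mod_cast by omega)]
    rw [pv_find?_range (d := LN - k0) (by omega)
      (by
        simp only [Function.comp_apply, zero_add]
        rw [pv_q_iff last nb LN (LN - k0) (by omega)]
        rw [show LN - (LN - k0) = k0 by omega]
        have hmm := hk0match
        rw [show last.toList.length = LN by omega] at hmm
        exact hmm.symm)
      (by
        intro e he
        simp only [Function.comp_apply, zero_add]
        rw [Bool.eq_false_iff]
        intro htrue
        rw [pv_q_iff last nb LN e (by omega)] at htrue
        have hlen := congrArg List.length htrue
        rw [List.length_drop, List.length_take] at hlen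
        have hkmax := hk0max (LN - e) (by omega)
          (by
            rw [show last.toList.length - (LN - e) = e by omega]
            exact htrue.symm)
        omega)]
    rw [Option.map_some]
    congr 1
    omega
  · -- m < L
    have hmLlt : mN < LN := by omega
    rw [if_pos (show ((mN : Int) < (LN : Int)) by exact_mod_cast hmLlt)]
    have hends : PySem.Str.endswith last nb = true ↔ nb.toList <:+ last.toList := by
      rw [PySem.Str.endswith_eq]
      exact PySem.Chars.endswith_iff _ _
    by_cases hcond : ((n2 : Int) ≤ (mN : Int) ∧ PySem.Str.endswith last nb = true)
    · rw [if_pos hcond]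
      have hn2m : n2 ≤ mN := by exact_mod_cast hcond.1
      have hsuf : nb.toList = last.toList.drop (mN - n2) :=
        List.suffix_iff_eq_drop.mp (hends.mp hcond.2)
      rw [pv_find?_range (d := mN - n2) (by omega)
        (by
          simp only [Function.comp_apply, zero_add]
          rw [pv_q_iff last nb LN (mN - n2) (by omega)]
          rw [← hsuf, List.take_of_length_le (by omega)])
        (by
          intro e he
          simp only [Function.comp_apply, zero_add]
          rw [Bool.eq_false_iff]
          intro htrue
          rw [pv_q_iff last nb LN e (by omega)] at htrue
          have hlen := congrArg List.length htrue
          rw [List.length_drop, List.length_take] at hlen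
          omega)]
      rw [Option.map_some]
      congr 1
      omega
    · rw [if_neg hcond]
      rw [pv_find?_range (d := LN) (by omega)
        (by
          simp only [Function.comp_apply, zero_add]
          rw [pv_q_iff last nb LN LN (le_refl _)]
          rw [List.drop_eq_nil_of_le (by omega), Nat.sub_self, List.take_zero])
        (by
          intro e he
          simp only [Function.comp_apply, zero_add]
          rw [Bool.eq_false_iff]
          intro htrue
          rw [pv_q_iff last nb LN e (by omega)] at htrue
          have hlen := congrArg List.length htrue
          rw [List.length_drop, List.length_take] at hlen
          rcases Nat.lt_or_ge mN e with hme | hme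
          · -- e beyond last: forces nb = []
            have hn20 : n2 = 0 := by omega
            apply hcond
            refine ⟨by exact_mod_cast (by omega : n2 ≤ mN), ?_⟩
            apply hends.mpr
            rw [List.length_eq_zero_iff.mp (by omega : nb.toList.length = 0)]
            exact List.nil_suffix
          · rcases Nat.lt_or_ge n2 (LN - e) with hcase | hcase2
            · have hn2me : n2 = mN - e := by omega
              apply hcond
              constructor
              · exact_mod_cast (by omega : n2 ≤ mN)
              · apply hends.mpr
                rw [List.take_of_length_le (by omega)] at htrue
                rw [← htrue]
                exact List.drop_suffix e last.toList
            · omega)]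
      rw [Option.map_some]
      congr 1
      omega

lemma pv_fold_eq (permutation_length : Int) (perm : String) (dB : String → Int) :
    ∀ (ns : List String) (sh : Int) (acc : List String),
    (∀ nb ∈ ns, pvCalcDist permutation_length perm nb = some (dB nb)) →
    ns.foldl (fun st nb =>
      match st with
      | none => none
      | some (sh, acc) =>
        match pvCalcDist permutation_length perm nb with
        | none => none
        | some d =>
          if d < sh then some (d, [nb])
          else if d = sh then some (sh, acc ++ [nb])
          else some (sh, acc)) (some (sh, acc)) =
    some (ns.foldl (fun (st : Int × List String) nb =>
      let d := dB nb
      if d < st.1 then (d, [nb])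
      else if d = st.1 then (st.1, st.2 ++ [nb])
      else st) (sh, acc)) := by
  intro ns
  induction ns with
  | nil => intro sh acc _; rfl
  | cons nb ns ih =>
    intro sh acc hall
    have hnb := hall nb (by simp)
    have hrest : ∀ x ∈ ns, pvCalcDist permutation_length perm x = some (dB x) :=
      fun x hx => hall x (by simp [hx])
    simp only [List.foldl_cons, hnb]
    split_ifs with h1 h2 <;> exact ih _ _ hrest

-- ===== VERDICT (by name: the statement is the Claim_ definition above) =====
theorem list_nearest_neighbours_spec : Claim_equal_list_nearest_neighbours := by
  intro L perm ns hdom hpre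
  unfold Spec_list_nearest_neighbours
  unfold Dom_list_nearest_neighbours at hdom
  simp only [Bool.and_eq_true, List.all_eq_true] at hdom
  obtain ⟨⟨hint, hperm⟩, hall⟩ := hdom
  have hdists : ∀ nb ∈ ns, pvCalcDist L perm nb =
      some (pvDistB L (PySem.Str.slice perm (some (-L)) none) nb) := by
    intro nb hnb
    apply pvDist_eq L perm nb hperm (hall nb hnb)
    rcases hpre with h | h | h
    · right; left; exact h
    · right; right; exact h
    · left; exact h nb hnb
  have hfold := pv_fold_eq L perm
    (fun nb => pvDistB L (PySem.Str.slice perm (some (-L)) none) nb) ns L [] hdists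
  unfold list_nearest_neighbours
  rw [hfold]
  rfl
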